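-- pv_equiv track=rewrite | github.com/mugunthank7/MatchMyJD | utils/helpers.py | split_resume_into_sections
-- ===== SOURCE A (Python) =====
-- def split_resume_into_sections(text: str) -> dict:
--     sections = {}
--     current = "general"
--     sections[current] = []
--
--     for line in text.splitlines():
--         l = line.strip().lower()
--         if l in {
--             "summary", "education", "experience", "projects",
--             "technical skills", "skills", "publications",
--             "leadership", "activities"
--         }:
--             current = l
--             sections[current] = []
--         else:
--             sections[current].append(line)
--
--     return {k: "\n".join(v) for k, v in sections.items()}
-- ===== SOURCE B (Python) =====
-- HEADERS = frozenset({
--     "summary", "education", "experience", "projects",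
--     "technical skills", "skills", "publications",
--     "leadership", "activities"
-- })
--
--
-- def _body(lines):
--     """Longest prefix of lines containing no header line."""
--     out = []
--     for line in lines:
--         if line.strip().lower() in HEADERS:
--             break
--         out.append(line)
--     return out
--
--
-- def split_resume_into_sections(text: str) -> dict:
--     lines = text.splitlines()
--     result = {}
--     gen = _body(lines)
--     result["general"] = "\n".join(gen)
--     rest = lines[len(gen):]
--     while rest:
--         header = rest[0].strip().lower()
--         body = _body(rest[1:])
--         result[header] = "\n".join(body)
--         rest = rest[1 + len(body):]
--     return result
-- ===== Notes on version B (the rewrite author's own statement) =====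
-- stated objective: alternative
-- what changed: B replaces A's line-by-line fold that appends into a dict of lists under a mutable section pointer by segment-wise scanning: the header-free prefix first, then repeatedly a header line plus its header-free body slice, joining and inserting each finished section directly.
import Mathlib
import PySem

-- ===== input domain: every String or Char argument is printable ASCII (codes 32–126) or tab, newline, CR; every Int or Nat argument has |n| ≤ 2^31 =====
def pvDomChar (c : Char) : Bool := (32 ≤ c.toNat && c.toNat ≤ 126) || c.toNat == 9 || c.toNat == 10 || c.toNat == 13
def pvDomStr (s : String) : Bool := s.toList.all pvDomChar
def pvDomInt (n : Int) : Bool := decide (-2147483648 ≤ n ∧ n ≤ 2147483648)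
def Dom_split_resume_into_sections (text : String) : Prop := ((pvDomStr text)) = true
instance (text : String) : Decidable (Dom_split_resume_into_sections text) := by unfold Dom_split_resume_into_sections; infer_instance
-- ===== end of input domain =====

-- B replaces A's single fold with a mutable section pointer by segment-wise scanning
-- (header-free prefix, then header + body slices), inserting each joined section directly.

-- the literal header-keyword set both Pythons test membership in
def pvHeaders : List String :=
  ["summary", "education", "experience", "projects",
   "technical skills", "skills", "publications",
   "leadership", "activities"]

-- ===== PORT A =====
def pvLoopA (d : PySem.Dict String (List String)) (cur : String) :
    List String → PySem.Dict String (List String)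
  | [] => d
  | line :: rest =>
    let l := PySem.Str.lower (PySem.Str.strip line)
    if pvHeaders.contains l then
      pvLoopA (d.insert l []) l rest
    else
      pvLoopA (d.modify cur [] (fun v => v ++ [line])) cur rest

def split_resume_into_sections (text : String) : List (String × String) :=
  let sections := pvLoopA ((PySem.Dict.empty : PySem.Dict String (List String)).insert "general" [])
                    "general" (PySem.Str.splitlines text)
  sections.items.map (fun kv => (kv.1, PySem.Str.join "\n" kv.2))

-- ===== PORT B =====
def pvIsHeader (line : String) : Bool :=
  pvHeaders.contains (PySem.Str.lower (PySem.Str.strip line))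

-- _body: the loop with break, as structural recursion
def pvBody : List String → List String
  | [] => []
  | line :: rest => if pvIsHeader line then [] else line :: pvBody rest

def pvLoopB (d : PySem.Dict String String) (rest : List String) : PySem.Dict String String :=
  match rest with
  | [] => d
  | h :: tl =>
    pvLoopB (d.insert (PySem.Str.lower (PySem.Str.strip h)) (PySem.Str.join "\n" (pvBody tl)))
      (tl.drop (pvBody tl).length)  -- rest[1+len(body):] ; the index is a nonnegative length, so drop is exact
termination_by rest.length
decreasing_by simp

def split_resume_into_sections_alt (text : String) : List (String × String) :=
  let lines := PySem.Str.splitlines text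
  let gen := pvBody lines
  (pvLoopB ((PySem.Dict.empty : PySem.Dict String String).insert "general" (PySem.Str.join "\n" gen))
    (lines.drop gen.length)).items  -- lines[len(gen):] with a nonnegative length: drop is exact

-- ===== PRECONDITION & SPEC =====
def Spec_split_resume_into_sections (text : String) (out : List (String × String)) : Prop := out = split_resume_into_sections_alt text
instance (text : String) (out : List (String × String)) : Decidable (Spec_split_resume_into_sections text out) := by unfold Spec_split_resume_into_sections; infer_instance

-- ===== CLAIM (what is proved, stated in full; the proofs are below) =====
def Claim_equal_split_resume_into_sections : Prop := ∀ (text : String), Dom_split_resume_into_sections text → Spec_split_resume_into_sections text (split_resume_into_sections text)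

-- ===== LEMMAS AND PROOFS =====

-- A's final dict comprehension {k: "\n".join(v)}, as a Dict-to-Dict map
def pvMapJoin (d : PySem.Dict String (List String)) : PySem.Dict String String :=
  PySem.Dict.mk (d.items.map (fun kv => (kv.1, PySem.Str.join "\n" kv.2)))

theorem contains_mapJoin (d : PySem.Dict String (List String)) (k : String) :
    (pvMapJoin d).contains k = d.contains k := by
  simp [pvMapJoin, PySem.Dict.contains, List.any_map, Function.comp_def]

theorem mapJoin_insert (d : PySem.Dict String (List String)) (k : String) (v : List String) :
    pvMapJoin (d.insert k v) = (pvMapJoin d).insert k (PySem.Str.join "\n" v) := by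
  apply PySem.Dict.ext
  show ((d.insert k v).items.map (fun kv => (kv.1, PySem.Str.join "\n" kv.2)))
      = ((pvMapJoin d).insert k (PySem.Str.join "\n" v)).items
  rw [PySem.Dict.items_insert, PySem.Dict.items_insert, contains_mapJoin]
  by_cases hc : d.contains k = true
  · simp only [hc, if_true, pvMapJoin, List.map_map]
    apply List.map_congr_left
    intro p _
    by_cases hp : p.1 = k
    · simp [hp]
    · simp [hp]
  · simp only [hc, if_false, Bool.false_eq_true, pvMapJoin, List.map_append, List.map_cons, List.map_nil]

theorem loopAB (lines : List String) :
    ∀ (d : PySem.Dict String (List String)) (cur : String) (v : List String),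
      pvMapJoin (pvLoopA (d.insert cur v) cur lines)
        = pvLoopB (pvMapJoin (d.insert cur (v ++ pvBody lines)))
            (lines.drop (pvBody lines).length) := by
  induction lines with
  | nil => intro d cur v; simp [pvLoopA, pvBody, pvLoopB]
  | cons line rest ih =>
    intro d cur v
    by_cases h : PySem.Str.lower (PySem.Str.strip line) ∈ pvHeaders
    · have hB : pvBody (line :: rest) = [] := by simp [pvBody, pvIsHeader, h]
      have hA : pvLoopA (d.insert cur v) cur (line :: rest)
          = pvLoopA ((d.insert cur v).insert (PySem.Str.lower (PySem.Str.strip line)) [])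
              (PySem.Str.lower (PySem.Str.strip line)) rest := by
        simp [pvLoopA, h]
      rw [hA, ih]
      rw [hB]
      simp only [List.append_nil, List.length_nil, List.drop_zero]
      rw [pvLoopB]
      rw [mapJoin_insert]
      simp
    · have hB : pvBody (line :: rest) = line :: pvBody rest := by
        simp [pvBody, pvIsHeader, h]
      have hA : pvLoopA (d.insert cur v) cur (line :: rest)
          = pvLoopA ((d.insert cur v).modify cur [] (fun w => w ++ [line])) cur rest := by
        simp [pvLoopA, h]
      have hmod : (d.insert cur v).modify cur [] (fun w => w ++ [line])
          = d.insert cur (v ++ [line]) := by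
        simp [PySem.Dict.modify, PySem.Dict.getD_insert_self, PySem.Dict.insert_insert_self]
      rw [hA, hmod, ih]
      rw [hB]
      simp [List.append_assoc]

-- ===== VERDICT (by name: the statement is the Claim_ definition above) =====
theorem split_resume_into_sections_spec : Claim_equal_split_resume_into_sections := by
  intro text _
  unfold Spec_split_resume_into_sections split_resume_into_sections split_resume_into_sections_alt
  have h := loopAB (PySem.Str.splitlines text) PySem.Dict.empty "general" []
  simp only [List.nil_append] at h
  have hmj : pvMapJoin ((PySem.Dict.empty : PySem.Dict String (List String)).insert "general"
      (pvBody (PySem.Str.splitlines text)))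
      = (PySem.Dict.empty : PySem.Dict String String).insert "general"
          (PySem.Str.join "\n" (pvBody (PySem.Str.splitlines text))) := by
    rw [mapJoin_insert]
    congr 1
  rw [hmj] at h
  show (pvLoopA _ _ _).items.map _ = _
  calc (pvLoopA ((PySem.Dict.empty : PySem.Dict String (List String)).insert "general" [])
          "general" (PySem.Str.splitlines text)).items.map
          (fun kv => (kv.1, PySem.Str.join "\n" kv.2))
      = (pvMapJoin (pvLoopA ((PySem.Dict.empty : PySem.Dict String (List String)).insert "general" [])
          "general" (PySem.Str.splitlines text))).items := rfl
    _ = _ := by rw [h]
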